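-- pv_equiv track=rewrite | github.com/MEARZIM/OTT-platform | backend/python-ml/recommendation.py | get_priority_categories
-- ===== SOURCE A (Python) =====
-- from collections import Counter
--
-- def get_priority_categories(liked_category_ids, watched_category_ids):
--
--     both = Counter()
--     only_watched = Counter()
--
--
--     for cat_id in watched_category_ids:
--         if cat_id in liked_category_ids:
--             both[cat_id] += 1
--         else:
--             only_watched[cat_id] += 1
--
--     # videos = fetch_videos()  # Fetch all videos from the backend
--
--     # for video in videos:
--     #     video_id = video.get("id")
--     #     video_category_ids = [cat["categoryId"] for cat in video.get("categories", [])]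
--     #      # Check if any of the video categories are in the watched categories
--     #     common_categories_ids = set(video_category_ids).intersection(watched_category_ids)
--
--     #     # If there's an intersection with liked categories, add to 'both' counter
--     #     liked_common_categories_ids = set(video_category_ids).intersection(liked_category_ids)
--     #     if liked_common_categories_ids and common_categories_ids:
--     #         both.update(liked_common_categories_ids)
--     #     elif common_categories_ids:  # If only watched categories
--     #         only_watched.update(common_categories_ids)
--
--     # Return sorted list: first from both, then from watched-only
--     sorted_both = [cat for cat, _ in both.most_common()]
--     sorted_only = [cat for cat, _ in only_watched.most_common() if cat not in sorted_both]
--     return sorted_both + sorted_only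
-- ===== SOURCE B (Python) =====
-- from collections import Counter
--
-- def get_priority_categories(liked_category_ids, watched_category_ids):
--     # One counter + one most_common() sort; partition the globally ranked list afterwards.
--     order = [cat for cat, _ in Counter(watched_category_ids).most_common()]
--     liked = []
--     other = []
--     for cat in order:
--         if cat in liked_category_ids:
--             liked.append(cat)
--         else:
--             other.append(cat)
--     return liked + other
-- ===== Notes on version B (the rewrite author's own statement) =====
-- stated objective: simpler
-- what changed: A counts watched ids into two separate counters (liked/not-liked branch inside the counting loop) and runs most_common twice plus a dead membership filter; B builds one Counter, calls most_common once for the global frequency ranking, and partitions that ranked list into liked/other in a single post-sort pass.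
import Mathlib
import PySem

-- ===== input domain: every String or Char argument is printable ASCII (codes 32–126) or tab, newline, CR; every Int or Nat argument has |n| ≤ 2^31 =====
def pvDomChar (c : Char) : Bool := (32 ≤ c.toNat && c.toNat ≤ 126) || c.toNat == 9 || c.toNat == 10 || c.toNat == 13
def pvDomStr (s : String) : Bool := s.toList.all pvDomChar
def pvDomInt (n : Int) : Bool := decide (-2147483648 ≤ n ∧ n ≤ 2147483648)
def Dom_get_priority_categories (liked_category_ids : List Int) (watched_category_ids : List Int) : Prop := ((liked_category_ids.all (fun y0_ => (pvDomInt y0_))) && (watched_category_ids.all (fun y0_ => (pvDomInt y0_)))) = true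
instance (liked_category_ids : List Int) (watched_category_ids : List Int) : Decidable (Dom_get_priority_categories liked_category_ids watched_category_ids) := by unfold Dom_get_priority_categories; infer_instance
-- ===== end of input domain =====

-- B replaces A's two counters and two most_common() sorts by one counter, one sort and a
-- post-sort partition of the ranked list (objective: simpler decomposition, same asymptotic cost).

-- ===== PORT A =====
def get_priority_categories (liked_category_ids : List Int) (watched_category_ids : List Int) : List Int :=
  -- for cat_id in watched_category_ids: both[cat_id] += 1 / only_watched[cat_id] += 1
  let st := watched_category_ids.foldl
    (fun (s : PySem.Dict Int Int × PySem.Dict Int Int) cat_id =>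
      if liked_category_ids.contains cat_id then (s.1.modify cat_id 0 (· + 1), s.2)
      else (s.1, s.2.modify cat_id 0 (· + 1)))
    (PySem.Dict.empty, PySem.Dict.empty)
  -- sorted_both = [cat for cat, _ in both.most_common()]
  let sorted_both := (PySem.List.sorted st.1.items (fun p => p.2) true).map (fun p => p.1)
  -- sorted_only = [cat for cat, _ in only_watched.most_common() if cat not in sorted_both]
  let sorted_only := ((PySem.List.sorted st.2.items (fun p => p.2) true).filter
      (fun p => !sorted_both.contains p.1)).map (fun p => p.1)
  sorted_both ++ sorted_only

-- ===== PORT B =====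
def get_priority_categories_alt (liked_category_ids : List Int) (watched_category_ids : List Int) : List Int :=
  -- order = [cat for cat, _ in Counter(watched_category_ids).most_common()]
  let order := (PySem.List.sorted (PySem.Dict.counter watched_category_ids).items
      (fun p => p.2) true).map (fun p => p.1)
  -- for cat in order: append to liked / other
  let st := order.foldl
    (fun (s : List Int × List Int) cat =>
      if liked_category_ids.contains cat then (s.1 ++ [cat], s.2) else (s.1, s.2 ++ [cat]))
    ([], [])
  st.1 ++ st.2

-- ===== PRECONDITION & SPEC =====
def Spec_get_priority_categories (liked_category_ids : List Int) (watched_category_ids : List Int) (out : List Int) : Prop := out = get_priority_categories_alt liked_category_ids watched_category_ids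
instance (liked_category_ids : List Int) (watched_category_ids : List Int) (out : List Int) : Decidable (Spec_get_priority_categories liked_category_ids watched_category_ids out) := by unfold Spec_get_priority_categories; infer_instance

-- ===== CLAIM (what is proved, stated in full; the proofs are below) =====
def Claim_equal_get_priority_categories : Prop := ∀ (liked_category_ids : List Int) (watched_category_ids : List Int), Dom_get_priority_categories liked_category_ids watched_category_ids → Spec_get_priority_categories liked_category_ids watched_category_ids (get_priority_categories liked_category_ids watched_category_ids)

-- ===== LEMMAS AND PROOFS =====

-- A's counting loop over a pair of dicts is the two counters of the two filtered streams.
theorem pv_fold_pair_counters (q : Int → Bool) (l : List Int)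
    (d1 d2 : PySem.Dict Int Int) :
    l.foldl (fun (s : PySem.Dict Int Int × PySem.Dict Int Int) c =>
        if q c then (s.1.modify c 0 (· + 1), s.2) else (s.1, s.2.modify c 0 (· + 1))) (d1, d2)
      = ((l.filter q).foldl (fun d x => d.modify x 0 (· + 1)) d1,
         (l.filter (fun c => !q c)).foldl (fun d x => d.modify x 0 (· + 1)) d2) := by
  induction l generalizing d1 d2 with
  | nil => rfl
  | cons x t ih =>
    by_cases hx : q x = true <;> simp [hx, ih]

-- B's partitioning loop appends the q-filter and the ¬q-filter of the scanned list.
theorem pv_fold_pair_partition (q : Int → Bool) (l : List Int) (a1 a2 : List Int) :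
    l.foldl (fun (s : List Int × List Int) c =>
        if q c then (s.1 ++ [c], s.2) else (s.1, s.2 ++ [c])) (a1, a2)
      = (a1 ++ l.filter q, a2 ++ l.filter (fun c => !q c)) := by
  induction l generalizing a1 a2 with
  | nil => simp
  | cons x t ih =>
    by_cases hx : q x = true <;> simp [hx, ih]

-- insertBy with the reverse comparator preserves the descending-key invariant.
theorem pv_pairwise_insertBy {α : Type} (key : α → Int) (x : α) (acc : List α)
    (h : acc.Pairwise (fun a b => key b ≤ key a)) :
    (PySem.List.insertBy (fun a b => decide (key b < key a)) x acc).Pairwise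
      (fun a b => key b ≤ key a) := by
  induction acc with
  | nil => simp [PySem.List.insertBy]
  | cons y ys ih =>
    rcases List.pairwise_cons.mp h with ⟨hy, hys⟩
    by_cases hb : key y < key x
    · rw [show PySem.List.insertBy (fun a b => decide (key b < key a)) x (y :: ys)
            = x :: y :: ys by simp [PySem.List.insertBy, hb]]
      refine List.pairwise_cons.mpr ⟨?_, h⟩
      intro z hz
      rcases List.mem_cons.mp hz with rfl | hz
      · omega
      · have := hy z hz; omega
    · rw [show PySem.List.insertBy (fun a b => decide (key b < key a)) x (y :: ys)
            = y :: PySem.List.insertBy (fun a b => decide (key b < key a)) x ys by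
          simp [PySem.List.insertBy, hb]]
      refine List.pairwise_cons.mpr ⟨?_, ih hys⟩
      intro z hz
      rcases (PySem.List.mem_insertBy _ x z ys).mp hz with rfl | hz
      · omega
      · exact hy z hz
-- filtering commutes with a single stable descending insertion (sorted accumulator).
theorem pv_filter_insertBy {α : Type} (key : α → Int) (q : α → Bool) (x : α) (acc : List α)
    (h : acc.Pairwise (fun a b => key b ≤ key a)) :
    (PySem.List.insertBy (fun a b => decide (key b < key a)) x acc).filter q
      = if q x then PySem.List.insertBy (fun a b => decide (key b < key a)) x (acc.filter q)
        else acc.filter q := by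
  induction acc with
  | nil => by_cases hx : q x = true <;> simp [PySem.List.insertBy, hx]
  | cons y ys ih =>
    rcases List.pairwise_cons.mp h with ⟨hy, hys⟩
    by_cases hb : key y < key x
    · rw [show PySem.List.insertBy (fun a b => decide (key b < key a)) x (y :: ys)
            = x :: y :: ys by simp [PySem.List.insertBy, hb]]
      have hall : ∀ z ∈ (y :: ys).filter q, key z < key x := by
        intro z hz
        rcases List.mem_filter.mp hz with ⟨hz, _⟩
        rcases List.mem_cons.mp hz with rfl | hz
        · exact hb
        · have := hy z hz; omega
      by_cases hx : q x = true
      · rw [if_pos hx, List.filter_cons_of_pos hx]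
        cases hf : (y :: ys).filter q with
        | nil => simp [PySem.List.insertBy]
        | cons w ws =>
          have hw : key w < key x := hall w (hf ▸ List.mem_cons_self)
          simp [PySem.List.insertBy, hw]
      · rw [if_neg (by simp_all), List.filter_cons_of_neg (by simp_all)]
    · rw [show PySem.List.insertBy (fun a b => decide (key b < key a)) x (y :: ys)
            = y :: PySem.List.insertBy (fun a b => decide (key b < key a)) x ys by
          simp [PySem.List.insertBy, hb]]
      by_cases hy' : q y = true
      · rw [List.filter_cons_of_pos hy', List.filter_cons_of_pos hy', ih hys]
        by_cases hx : q x = true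
        · simp only [if_pos hx]
          rw [show PySem.List.insertBy (fun a b => decide (key b < key a)) x (y :: ys.filter q)
                = y :: PySem.List.insertBy (fun a b => decide (key b < key a)) x (ys.filter q) by
              simp [PySem.List.insertBy, hb]]
        · simp [hx]
      · rw [List.filter_cons_of_neg (by simp_all), List.filter_cons_of_neg (by simp_all), ih hys]

-- stable reverse sort commutes with filtering.
theorem pv_sorted_filter {α : Type} (key : α → Int) (q : α → Bool) (xs : List α) :
    PySem.List.sorted (xs.filter q) key true = (PySem.List.sorted xs key true).filter q := by
  rw [PySem.List.sorted_rev_eq_foldl_insertBy, PySem.List.sorted_rev_eq_foldl_insertBy]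
  suffices h : ∀ (l : List α) (acc : List α), acc.Pairwise (fun a b => key b ≤ key a) →
      (l.filter q).foldl (fun acc x => PySem.List.insertBy (fun a b => decide (key b < key a)) x acc)
        (acc.filter q)
      = (l.foldl (fun acc x => PySem.List.insertBy (fun a b => decide (key b < key a)) x acc)
          acc).filter q by
    simpa using h xs [] (by simp)
  intro l
  induction l with
  | nil => intro acc _; rfl
  | cons x t ih =>
    intro acc hacc
    by_cases hx : q x = true
    · rw [List.filter_cons_of_pos hx]
      simp only [List.foldl_cons]
      rw [show PySem.List.insertBy (fun a b => decide (key b < key a)) x (acc.filter q)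
            = (PySem.List.insertBy (fun a b => decide (key b < key a)) x acc).filter q by
          rw [pv_filter_insertBy key q x acc hacc, if_pos hx]]
      exact ih _ (pv_pairwise_insertBy key x acc hacc)
    · rw [List.filter_cons_of_neg (by simp [hx])]
      simp only [List.foldl_cons]
      rw [show acc.filter q
            = (PySem.List.insertBy (fun a b => decide (key b < key a)) x acc).filter q by
          rw [pv_filter_insertBy key q x acc hacc, if_neg (by simp [hx])]]
      exact ih _ (pv_pairwise_insertBy key x acc hacc)

-- PySem.Set.ofList commutes with filtering.
theorem pv_ofList_filter (q : Int → Bool) (xs : List Int) :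
    PySem.Set.ofList (xs.filter q) = (PySem.Set.ofList xs).filter q := by
  suffices h : ∀ (l : List Int) (s : List Int),
      (l.filter q).foldl PySem.Set.add (s.filter q) = (l.foldl PySem.Set.add s).filter q by
    simpa [PySem.Set.ofList, PySem.Set.empty] using h xs []
  intro l
  induction l with
  | nil => intro s; rfl
  | cons x t ih =>
    intro s
    by_cases hx : q x = true
    · rw [List.filter_cons_of_pos hx]
      simp only [List.foldl_cons]
      rw [show PySem.Set.add (s.filter q) x = (PySem.Set.add s x).filter q by
        by_cases hm : x ∈ s <;>
          simp [PySem.Set.add, PySem.Set.contains, hm, hx, List.filter_append,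
            List.mem_filter]]
      exact ih _
    · rw [List.filter_cons_of_neg (by simp [hx])]
      simp only [List.foldl_cons]
      rw [show s.filter q = (PySem.Set.add s x).filter q by
        by_cases hm : x ∈ s <;>
          simp [PySem.Set.add, PySem.Set.contains, hm, hx, List.filter_append]]
      exact ih _

-- the items of the counter of a filtered stream are the q-filtered items of the full counter.
theorem pv_items_counter_filter (q : Int → Bool) (xs : List Int) :
    (PySem.Dict.counter (xs.filter q)).items
      = (PySem.Dict.counter xs).items.filter (fun p => q p.1) := by
  rw [PySem.Dict.items_counter, PySem.Dict.items_counter, List.filter_map,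
    pv_ofList_filter]
  refine List.map_congr_left ?_
  intro k hk
  rcases List.mem_filter.mp hk with ⟨_, hq⟩
  simp only [List.count_filter hq]

-- A's head list = B's liked partition, A's tail (before the dead filter) = B's other partition.
-- the ranked full list, filtered by a predicate on the category, is the ranked filtered stream.
theorem pv_chain (watched : List Int) (p : Int → Bool) :
    (PySem.List.sorted (PySem.Dict.counter (watched.filter p)).items (fun pr => pr.2) true).map
        (fun pr => pr.1)
      = ((PySem.List.sorted (PySem.Dict.counter watched).items (fun pr => pr.2) true).map
          (fun pr => pr.1)).filter p := by
  rw [pv_items_counter_filter, pv_sorted_filter, List.filter_map]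
  rfl

theorem pv_main (liked watched : List Int) :
    get_priority_categories liked watched = get_priority_categories_alt liked watched := by
  simp only [get_priority_categories, get_priority_categories_alt]
  rw [pv_fold_pair_counters (fun c => liked.contains c), ← PySem.Dict.counter_eq_foldl,
    ← PySem.Dict.counter_eq_foldl, pv_fold_pair_partition (fun c => liked.contains c)]
  simp only [List.nil_append]
  have hdead : ∀ pr ∈ PySem.List.sorted
      (PySem.Dict.counter (watched.filter (fun c => !liked.contains c))).items
      (fun pr => pr.2) true,
      (!(((PySem.List.sorted (PySem.Dict.counter (watched.filter (fun c => liked.contains c))).items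
          (fun pr => pr.2) true).map (fun pr => pr.1)).contains pr.1)) = true := by
    intro pr hpr
    have h1 : pr ∈ (PySem.Dict.counter (watched.filter (fun c => !liked.contains c))).items :=
      ((PySem.List.sorted_perm _ _ _).mem_iff).mp hpr
    rw [PySem.Dict.items_counter] at h1
    rcases List.mem_map.mp h1 with ⟨k, hk, rfl⟩
    have hknot : liked.contains k = false := by
      have := List.mem_filter.mp ((PySem.Set.mem_ofList _ _).mp hk)
      simpa using this.2
    rw [Bool.not_eq_eq_eq_not, Bool.not_true, Bool.eq_false_iff]
    intro hcon
    rcases List.mem_map.mp (List.contains_iff_mem.mp hcon) with ⟨pr2, hpr2, hfst⟩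
    have h2 : pr2 ∈ (PySem.Dict.counter (watched.filter (fun c => liked.contains c))).items :=
      ((PySem.List.sorted_perm _ _ _).mem_iff).mp hpr2
    rw [PySem.Dict.items_counter] at h2
    rcases List.mem_map.mp h2 with ⟨k2, hk2, rfl⟩
    have : liked.contains k2 = true :=
      (List.mem_filter.mp ((PySem.Set.mem_ofList _ _).mp hk2)).2
    simp only at hfst
    rw [hfst] at this
    rw [hknot] at this
    exact Bool.false_ne_true this
  rw [List.filter_eq_self.mpr hdead, pv_chain watched (fun c => liked.contains c),
    pv_chain watched (fun c => !liked.contains c)]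

-- ===== VERDICT (by name: the statement is the Claim_ definition above) =====
theorem get_priority_categories_spec : Claim_equal_get_priority_categories := by
  intro liked watched _
  exact pv_main liked watched
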